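-- pv_equiv track=rewrite | github.com/stefaneng/StatCom-MCYJ-downloader | website/keyword_reduction.py | apply_keyword_reduction
-- ===== SOURCE A (Python) =====
-- from typing import Dict, List
--
-- def apply_keyword_reduction(keywords: List[str], keyword_map: Dict[str, str]) -> List[str]:
--     """
--     Apply keyword reduction to a list of keywords.
--
--     Args:
--         keywords: List of original keywords
--         keyword_map: Dictionary mapping original_keyword to reduced_keyword.
--                     Empty string values cause the keyword to be discarded.
--
--     Returns:
--         List of reduced keywords (with duplicates removed, preserving order).
--         Keywords mapped to empty string are discarded.
--     """
--     if not keyword_map: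
--         return keywords
--
--     reduced_keywords = []
--     seen = set()
--
--     for keyword in keywords:
--         # Apply reduction if mapping exists, otherwise keep original
--         reduced = keyword_map.get(keyword, keyword)
--
--         # Discard keywords mapped to empty string
--         if reduced == '':
--             continue
--
--         # Add to result list only if not already seen (removes duplicates)
--         if reduced not in seen:
--             reduced_keywords.append(reduced)
--             seen.add(reduced)
--
--     return reduced_keywords
-- ===== SOURCE B (Python) =====
-- def apply_keyword_reduction(keywords, keyword_map):
--     if not keyword_map:
--         return keywords
--     # Phase 1: remap and drop empties.
--     mapped = [keyword_map.get(k, k) for k in keywords if keyword_map.get(k, k) != '']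
--     # Phase 2: dedup without any membership test or seen-set: walk BACKWARDS
--     # overwriting first[r] = i, so the surviving value is each value's FIRST
--     # index; then emit the positions that recorded themselves.
--     first = {}
--     for i, r in reversed(list(enumerate(mapped))):
--         first[r] = i
--     return [r for i, r in enumerate(mapped) if first[r] == i]
-- ===== Notes on version B (the rewrite author's own statement) =====
-- stated objective: alternative
-- what changed: Replaces A's single forward pass with an interleaved seen-set by a remap/drop-empties phase plus a seen-set-free dedup: a backward pass unconditionally overwrites first[r]=i (last write in reverse = first occurrence, no membership test), then a forward pass emits exactly the positions that recorded themselves.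
import Mathlib
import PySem

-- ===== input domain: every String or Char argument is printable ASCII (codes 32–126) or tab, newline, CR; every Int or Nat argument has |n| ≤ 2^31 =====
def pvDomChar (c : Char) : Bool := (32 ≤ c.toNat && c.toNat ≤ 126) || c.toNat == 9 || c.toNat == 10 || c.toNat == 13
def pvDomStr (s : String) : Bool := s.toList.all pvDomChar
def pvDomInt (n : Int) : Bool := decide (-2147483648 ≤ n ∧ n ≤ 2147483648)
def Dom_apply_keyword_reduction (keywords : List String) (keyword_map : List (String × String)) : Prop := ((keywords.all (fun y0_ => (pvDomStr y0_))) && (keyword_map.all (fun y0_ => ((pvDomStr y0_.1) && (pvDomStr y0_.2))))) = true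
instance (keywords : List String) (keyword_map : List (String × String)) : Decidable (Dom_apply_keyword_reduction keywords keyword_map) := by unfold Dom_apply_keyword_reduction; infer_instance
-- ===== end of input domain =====

-- B replaces A's forward pass with an interleaved seen-set by a remap/drop-empties
-- phase plus a seen-set-free dedup: a backward overwrite pass records each value's
-- first index, then a forward pass emits the positions that recorded themselves;
-- objective: alternative.

-- ===== PORT A =====
-- A's loop body: reduced = keyword_map.get(keyword, keyword); skip if '' ; append+mark if unseen
def pvStepA (keyword_map : List (String × String))
    (st : List String × PySem.Set String) (keyword : String) :
    List String × PySem.Set String :=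
  let reduced := PySem.Dict.getD (PySem.Dict.mk keyword_map) keyword keyword
  if reduced == "" then st
  else if PySem.Set.contains st.2 reduced then st
  else (st.1 ++ [reduced], PySem.Set.add st.2 reduced)

def apply_keyword_reduction (keywords : List String) (keyword_map : List (String × String)) : List String :=
  if keyword_map.isEmpty then keywords
  else (keywords.foldl (pvStepA keyword_map) ([], PySem.Set.empty)).1

-- ===== PORT B =====
-- B's backward pass: for i, r in reversed(list(enumerate(mapped))): first[r] = i
def pvBuildFirst (mapped : List String) : PySem.Dict String Int :=
  (PySem.List.enumerate mapped 0).reverse.foldl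
    (fun d p => PySem.Dict.insert d p.2 p.1) PySem.Dict.empty

def apply_keyword_reduction_alt (keywords : List String) (keyword_map : List (String × String)) : List String :=
  if keyword_map.isEmpty then keywords
  else
    -- [keyword_map.get(k, k) for k in keywords if keyword_map.get(k, k) != '']
    let mapped := keywords.filterMap (fun k =>
      let r := PySem.Dict.getD (PySem.Dict.mk keyword_map) k k
      if r == "" then none else some r)
    let first := pvBuildFirst mapped
    -- [r for i, r in enumerate(mapped) if first[r] == i]  (first[r] never raises: r is a key)
    (PySem.List.enumerate mapped 0).filterMap (fun p =>
      if PySem.Dict.get? first p.2 == some p.1 then some p.2 else none)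

-- ===== PRECONDITION & SPEC =====
def Spec_apply_keyword_reduction (keywords : List String) (keyword_map : List (String × String)) (out : List String) : Prop := out = apply_keyword_reduction_alt keywords keyword_map
instance (keywords : List String) (keyword_map : List (String × String)) (out : List String) : Decidable (Spec_apply_keyword_reduction keywords keyword_map out) := by unfold Spec_apply_keyword_reduction; infer_instance

-- ===== CLAIM =====
def Claim_equal_apply_keyword_reduction : Prop := ∀ (keywords : List String) (keyword_map : List (String × String)), Dom_apply_keyword_reduction keywords keyword_map → Spec_apply_keyword_reduction keywords keyword_map (apply_keyword_reduction keywords keyword_map)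

-- ===== LEMMAS AND PROOFS =====

-- One step of A's loop, on a state whose list and seen-set coincide,
-- keeps them coinciding: it is 'skip on empty, else Set.add'.
theorem pvStepA_pair (keyword_map : List (String × String)) (s : List String) (k : String) :
    pvStepA keyword_map (s, s) k =
      (let r := PySem.Dict.getD (PySem.Dict.mk keyword_map) k k
       let t := if r == "" then s else PySem.Set.add s r
       (t, t)) := by
  unfold pvStepA PySem.Set.add
  by_cases h0 : (PySem.Dict.getD (PySem.Dict.mk keyword_map) k k == "") = true
  · simp [h0]
  · by_cases hm : PySem.Dict.getD (PySem.Dict.mk keyword_map) k k ∈ s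
    · simp [h0, hm]
    · simp [h0, hm]

-- A's fold, started on a duplicated state (s, s), computes
-- foldl Set.add over the remapped-and-filtered keywords.
theorem pv_fold_inv (keyword_map : List (String × String)) (keywords : List String)
    (s : List String) :
    (keywords.foldl (pvStepA keyword_map) (s, s)).1
    = (keywords.filterMap (fun k =>
        let r := PySem.Dict.getD (PySem.Dict.mk keyword_map) k k
        if r == "" then none else some r)).foldl PySem.Set.add s := by
  induction keywords generalizing s with
  | nil => rfl
  | cons k ks ih =>
    rw [List.foldl_cons, pvStepA_pair, List.filterMap_cons]
    by_cases h0 : (PySem.Dict.getD (PySem.Dict.mk keyword_map) k k == "") = true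
    · simpa [h0] using ih s
    · simpa [h0] using ih (PySem.Set.add s (PySem.Dict.getD (PySem.Dict.mk keyword_map) k k))

-- Characterisation of folding Set.add: the seed followed by the first
-- occurrences of xs that are not already in the seed.
theorem pv_foldl_add_char (xs : List String) (s : List String) :
    xs.foldl PySem.Set.add s
      = s ++ (PySem.Set.ofList xs).filter (fun y => !(decide (y ∈ s))) := by
  induction xs generalizing s with
  | nil => simp [PySem.Set.ofList]
  | cons x xs ih =>
    have hofl : PySem.Set.ofList (x :: xs)
        = x :: (PySem.Set.ofList xs).filter (fun y => !(y == x)) := by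
      have h1 : PySem.Set.ofList (x :: xs) = xs.foldl PySem.Set.add [x] := by
        rw [PySem.Set.ofList_eq_foldl]; rfl
      rw [h1, ih [x]]
      simp only [List.singleton_append, List.cons.injEq, true_and]
      apply List.filter_congr
      intro y _
      by_cases hyx : y = x <;> simp [hyx]
    rw [List.foldl_cons]
    by_cases hm : x ∈ s
    · have hadd : PySem.Set.add s x = s := by simp [PySem.Set.add, PySem.Set.contains, hm]
      rw [hadd, ih s, hofl, List.filter_cons]
      have : (decide (x ∈ s) : Bool) = true := by simp [hm]
      simp only [this, Bool.not_true]
      rw [List.filter_filter]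
      congr 1
      apply List.filter_congr
      intro y _
      by_cases hyx : y = x
      · simp [hyx, hm]
      · simp [hyx]
    · have hadd : PySem.Set.add s x = s ++ [x] := by simp [PySem.Set.add, PySem.Set.contains, hm]
      rw [hadd, ih (s ++ [x]), hofl, List.filter_cons]
      simp only [hm, decide_false, Bool.not_false, if_pos]
      rw [List.filter_filter, List.append_assoc]
      have hfil : (PySem.Set.ofList xs).filter (fun y => !(decide (y ∈ s ++ [x])))
          = (PySem.Set.ofList xs).filter (fun y => !(decide (y ∈ s)) && !(y == x)) := by
        apply List.filter_congr
        intro y _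
        by_cases hyx : y = x <;> by_cases hys : y ∈ s <;> simp [hyx, hys]
      rw [hfil]
      simp

-- set(x :: xs) keeps x first and drops every later occurrence of x.
theorem pv_ofList_cons (x : String) (xs : List String) :
    PySem.Set.ofList (x :: xs)
      = x :: (PySem.Set.ofList xs).filter (fun y => !(y == x)) := by
  have h1 : PySem.Set.ofList (x :: xs) = xs.foldl PySem.Set.add [x] := by
    rw [PySem.Set.ofList_eq_foldl]; rfl
  rw [h1, pv_foldl_add_char]
  simp only [List.singleton_append, List.cons.injEq, true_and]
  apply List.filter_congr
  intro y _
  by_cases hyx : y = x <;> simp [hyx]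

-- list.index over an append: search the left part first.
theorem pv_index?_append (pre xs : List String) (r : String) :
    PySem.List.index? (pre ++ xs) r =
      match PySem.List.index? pre r with
      | some k => some k
      | none => (PySem.List.index? xs r).map (fun k => pre.length + k) := by
  induction pre with
  | nil =>
    simp only [List.nil_append, PySem.List.index?_eq_idxOf?, List.idxOf?_nil, List.length_nil]
    cases h : List.idxOf? r xs <;> simp
  | cons p pre ih =>
    simp only [List.cons_append, PySem.List.index?_eq_idxOf?, List.idxOf?_cons] at *
    by_cases hpr : (p == r) = true
    · simp [hpr]
    · simp only [hpr, Bool.false_eq_true, if_false, ih]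
      cases h : List.idxOf? r pre with
      | some k => simp
      | none =>
        simp only [Option.map_map]
        cases h2 : List.idxOf? r xs <;> simp <;> omega

-- A found index is inside the list.
theorem pv_index?_lt (pre : List String) (r : String) (k : Nat)
    (h : PySem.List.index? pre r = some k) : k < pre.length := by
  rw [PySem.List.index?_eq_some_iff] at h
  obtain ⟨p1, suf, heq, hlen, -⟩ := h
  subst heq hlen
  simp

-- The backward-overwrite dict maps each element to its FIRST index (offset s).
theorem pv_buildFirst_get? (xs : List String) (s : Int) (d0 : PySem.Dict String Int)
    (r : String) :
    PySem.Dict.get? ((PySem.List.enumerate xs s).foldr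
        (fun p d => PySem.Dict.insert d p.2 p.1) d0) r
      = match PySem.List.index? xs r with
        | some k => some (s + (k : Int))
        | none => PySem.Dict.get? d0 r := by
  induction xs generalizing s with
  | nil => simp [PySem.List.enumerate_nil, PySem.List.index?]
  | cons x xs ih =>
    rw [PySem.List.enumerate_cons, List.foldr_cons]
    rw [PySem.Dict.get?_insert]
    rw [PySem.List.index?_eq_idxOf?, List.idxOf?_cons]
    by_cases hrx : r = x
    · simp [hrx]
    · have hbx : (x == r) = false := by simp [Ne.symm hrx]
      rw [if_neg hrx, ih (s + 1)]
      rw [PySem.List.index?_eq_idxOf?]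
      simp only [hbx, Bool.false_eq_true, if_false]
      cases h : List.idxOf? r xs with
      | none => simp
      | some k => simp; ring

-- The emit pass keeps exactly the first occurrences (relative to the prefix pre).
theorem pv_emit_char (xs : List String) (pre : List String) :
    (PySem.List.enumerate xs (pre.length : Int)).filterMap (fun p =>
        if (match PySem.List.index? (pre ++ xs) p.2 with
            | some k => some ((k : Int))
            | none => (none : Option Int)) == some p.1
        then some p.2 else none)
      = (PySem.Set.ofList xs).filter (fun y => !(decide (y ∈ pre))) := by
  induction xs generalizing pre with
  | nil => simp [PySem.List.enumerate_nil, PySem.Set.ofList]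
  | cons x xs ih =>
    rw [PySem.List.enumerate_cons, List.filterMap_cons, pv_ofList_cons, List.filter_cons]
    have happ : pre ++ x :: xs = (pre ++ [x]) ++ xs := by simp
    have htail : (PySem.List.enumerate xs ((pre.length : Int) + 1)).filterMap (fun p =>
        if (match PySem.List.index? (pre ++ x :: xs) p.2 with
            | some k => some ((k : Int))
            | none => (none : Option Int)) == some p.1
        then some p.2 else none)
      = (PySem.Set.ofList xs).filter (fun y => !(decide (y ∈ pre ++ [x]))) := by
      have hlen : ((pre ++ [x]).length : Int) = (pre.length : Int) + 1 := by simp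
      rw [happ, ← hlen, ih (pre ++ [x])]
    by_cases hm : x ∈ pre
    · -- head dropped: index? finds x inside pre, at an index < pre.length
      obtain ⟨k, hk⟩ : ∃ k, PySem.List.index? pre x = some k := by
        have := PySem.List.index?_isSome_iff (xs := pre) (v := x)
        rcases h : PySem.List.index? pre x with _ | k
        · rw [h] at this; simp [hm] at this
        · exact ⟨k, rfl⟩
      have hklt : k < pre.length := pv_index?_lt pre x k hk
      have hidx : PySem.List.index? (pre ++ x :: xs) x = some k := by
        rw [pv_index?_append, hk]
      have hcond : ((match PySem.List.index? (pre ++ x :: xs) x with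
            | some k => some ((k : Int))
            | none => (none : Option Int)) == some ((pre.length : Int))) = false := by
        rw [hidx]
        simp only [beq_eq_false_iff_ne, ne_eq, Option.some.injEq]
        intro hc
        omega
      simp only [hcond, Bool.false_eq_true, if_false, htail]
      have : (decide (x ∈ pre)) = true := by simp [hm]
      simp only [this, Bool.not_true, Bool.false_eq_true, if_false]
      rw [List.filter_filter]
      apply List.filter_congr
      intro y _
      by_cases hyx : y = x <;> simp [hyx, hm]
    · -- head kept: first occurrence is at position pre.length
      have hidx : PySem.List.index? (pre ++ x :: xs) x = some pre.length := by
        rw [pv_index?_append]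
        have hnone : PySem.List.index? pre x = none := by
          rw [PySem.List.index?_eq_none_iff]; exact hm
        rw [hnone, PySem.List.index?_cons_self]
        simp
      have hcond : ((match PySem.List.index? (pre ++ x :: xs) x with
            | some k => some ((k : Int))
            | none => (none : Option Int)) == some ((pre.length : Int))) = true := by
        rw [hidx]; simp
      simp only [hcond, if_true, htail]
      have : (decide (x ∈ pre)) = false := by simp [hm]
      simp only [this, Bool.not_false, if_true]
      congr 1
      rw [List.filter_filter]
      apply List.filter_congr
      intro y _
      by_cases hyx : y = x <;> simp [hyx, hm]

-- ===== VERDICT =====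
theorem apply_keyword_reduction_spec : Claim_equal_apply_keyword_reduction := by
  intro keywords keyword_map _
  unfold Spec_apply_keyword_reduction apply_keyword_reduction apply_keyword_reduction_alt
  by_cases h : keyword_map.isEmpty
  · simp [h]
  · simp only [h, Bool.false_eq_true, if_false]
    rw [show (PySem.Set.empty : PySem.Set String) = ([] : List String) from rfl]
    rw [pv_fold_inv]
    have key : ∀ mp : List String,
        mp.foldl PySem.Set.add ([] : List String)
        = (PySem.List.enumerate mp 0).filterMap (fun p =>
            if PySem.Dict.get? (pvBuildFirst mp) p.2 == some p.1 then some p.2 else none) := by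
      intro mp
      rw [pv_foldl_add_char]
      have hc : (PySem.List.enumerate mp 0).filterMap (fun p =>
            if PySem.Dict.get? (pvBuildFirst mp) p.2 == some p.1 then some p.2 else none)
          = (PySem.List.enumerate mp ((([] : List String).length : Int))).filterMap (fun p =>
            if (match PySem.List.index? (([] : List String) ++ mp) p.2 with
                | some k => some ((k : Int))
                | none => (none : Option Int)) == some p.1
            then some p.2 else none) := by
        simp only [List.length_nil, Nat.cast_zero, List.nil_append]
        apply List.filterMap_congr
        intro p _
        have hd : PySem.Dict.get? (pvBuildFirst mp) p.2
            = match PySem.List.index? mp p.2 with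
              | some k => some ((k : Int))
              | none => (none : Option Int) := by
          unfold pvBuildFirst
          rw [List.foldl_reverse]
          have h2 := pv_buildFirst_get? mp 0 PySem.Dict.empty p.2
          simp only [zero_add] at h2
          rw [h2]
          cases PySem.List.index? mp p.2 <;> rfl
        rw [hd]
        rfl
      rw [hc, pv_emit_char]
      simp
    exact key _
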